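-- pv_equiv track=rewrite | github.com/sahil1105/vfs | 4CT-ReduceLog-DBer.py | get_config_file_segments
-- ===== SOURCE A (Python) =====
-- def get_config_file_segments(lines):
--     segments = []
--     curr_segment = []
--     for l in lines:
--         if l == '':
--             segments.append(curr_segment)
--             curr_segment = []
--         else:
--             curr_segment.append(l)
--     return segments
-- ===== SOURCE B (Python) =====
-- def get_config_file_segments(lines):
--     delims = [i for i, l in enumerate(lines) if l == '']
--     segments = []
--     start = 0
--     for i in delims:
--         segments.append(lines[start:i])
--         start = i + 1
--     return segments
-- ===== Notes on version B (the rewrite author's own statement) =====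
-- stated objective: alternative
-- what changed: Replaces the single-pass accumulator loop with a two-phase computation: first collect the indices of the empty-line delimiters, then slice the original list between a running start cursor and each delimiter (no flush after the loop, so trailing non-empty lines are dropped exactly as in A).
import Mathlib
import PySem

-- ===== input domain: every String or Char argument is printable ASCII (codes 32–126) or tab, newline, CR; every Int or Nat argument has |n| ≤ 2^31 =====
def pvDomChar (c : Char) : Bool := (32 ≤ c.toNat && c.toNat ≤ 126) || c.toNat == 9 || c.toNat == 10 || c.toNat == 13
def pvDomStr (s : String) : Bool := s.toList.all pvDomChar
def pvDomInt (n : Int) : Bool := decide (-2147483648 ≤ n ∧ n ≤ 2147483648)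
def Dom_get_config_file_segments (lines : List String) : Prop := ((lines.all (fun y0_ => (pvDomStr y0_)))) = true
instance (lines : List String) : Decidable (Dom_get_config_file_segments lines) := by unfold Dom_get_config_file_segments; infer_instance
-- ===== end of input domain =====

-- B replaces A's single-pass accumulator with a two-phase computation (collect delimiter
-- indices, then slice between them); alternative decomposition, same cost.


-- ===== PORT A =====
def get_config_file_segments (lines : List String) : List (List String) :=
  (lines.foldl
    (fun (st : List (List String) × List String) l =>
      if l == "" then (st.1 ++ [st.2], [])
      else (st.1, st.2 ++ [l]))
    ([], [])).1

-- ===== PORT B =====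
def get_config_file_segments_alt (lines : List String) : List (List String) :=
  let delims : List Int :=
    ((PySem.List.enumerate lines 0).filter (fun p => p.2 == "")).map (fun p => p.1)
  (delims.foldl
    (fun (st : List (List String) × Int) i =>
      (st.1 ++ [PySem.List.slice lines (some st.2) (some i)], i + 1))
    ([], 0)).1

-- ===== PRECONDITION & SPEC =====
def Spec_get_config_file_segments (lines : List String) (out : List (List String)) : Prop := out = get_config_file_segments_alt lines
instance (lines : List String) (out : List (List String)) : Decidable (Spec_get_config_file_segments lines out) := by unfold Spec_get_config_file_segments; infer_instance

-- ===== CLAIM (what is proved, stated in full; the proofs are below) =====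
def Claim_equal_get_config_file_segments : Prop := ∀ (lines : List String), Dom_get_config_file_segments lines → Spec_get_config_file_segments lines (get_config_file_segments lines)

-- ===== LEMMAS AND PROOFS =====

/-- Prepend an element to the first segment (nothing if there are no segments). -/
def pvConsFirst (l : String) : List (List String) → List (List String)
  | [] => []
  | s :: ss => (l :: s) :: ss

/-- Reference splitter: the common specification both ports are reduced to. -/
def pvSplit : List String → List (List String)
  | [] => []
  | l :: ls => if l = "" then [] :: pvSplit ls else pvConsFirst l (pvSplit ls)

/-- Prepend a whole list to the first segment (nothing if there are no segments). -/
def pvMergeFirst (cur : List String) : List (List String) → List (List String)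
  | [] => []
  | s :: ss => (cur ++ s) :: ss

theorem pvMergeFirst_nil (xs : List (List String)) : pvMergeFirst [] xs = xs := by
  cases xs <;> simp [pvMergeFirst]

theorem pvMergeFirst_consFirst (cur : List String) (l : String) (xs : List (List String)) :
    pvMergeFirst cur (pvConsFirst l xs) = pvMergeFirst (cur ++ [l]) xs := by
  cases xs <;> simp [pvMergeFirst, pvConsFirst]

theorem A_fold (ls : List String) : ∀ (segs : List (List String)) (cur : List String),
    (ls.foldl
      (fun (st : List (List String) × List String) l =>
        if l == "" then (st.1 ++ [st.2], [])
        else (st.1, st.2 ++ [l]))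
      (segs, cur)).1 = segs ++ pvMergeFirst cur (pvSplit ls) := by
  induction ls with
  | nil => intro segs cur; simp [pvSplit, pvMergeFirst]
  | cons l ls ih =>
    intro segs cur
    by_cases h : l = ""
    · subst h
      simp only [List.foldl_cons, beq_self_eq_true, if_pos]
      rw [ih, pvSplit]
      simp only [if_pos rfl, pvMergeFirst, List.append_assoc, List.singleton_append]
      cases pvSplit ls <;> simp [pvMergeFirst]
    · have hb : (l == "") = false := beq_eq_false_iff_ne.mpr h
      rw [List.foldl_cons, if_neg (by simp [hb])]
      rw [ih, pvSplit, if_neg h, pvMergeFirst_consFirst]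

theorem A_eq_split (lines : List String) : get_config_file_segments lines = pvSplit lines := by
  unfold get_config_file_segments
  rw [A_fold]
  simp [pvMergeFirst_nil]

/-- Delimiter indices of `suf` when its first element sits at absolute index `k`. -/
def pvDelims (suf : List String) (k : Int) : List Int :=
  ((PySem.List.enumerate suf k).filter (fun p => p.2 == "")).map (fun p => p.1)

theorem pvDelims_cons (l : String) (ls : List String) (k : Int) :
    pvDelims (l :: ls) k =
      if l = "" then k :: pvDelims ls (k + 1) else pvDelims ls (k + 1) := by
  by_cases h : l = "" <;>
    simp [pvDelims, PySem.List.enumerate_cons, h]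

theorem B_fold (full : List String) (suf : List String) :
    ∀ (cur : List String) (s : Nat) (segs : List (List String)),
    full.drop s = cur ++ suf →
    ((pvDelims suf ((s : Int) + cur.length)).foldl
      (fun (st : List (List String) × Int) i =>
        (st.1 ++ [PySem.List.slice full (some st.2) (some i)], i + 1))
      (segs, (s : Int))).1 = segs ++ pvMergeFirst cur (pvSplit suf) := by
  induction suf with
  | nil =>
    intro cur s segs _
    simp [pvDelims, PySem.List.enumerate_nil, pvSplit, pvMergeFirst]
  | cons l ls ih =>
    intro cur s segs hdrop
    rw [pvDelims_cons]
    by_cases h : l = ""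
    · subst h
      rw [if_pos rfl]
      simp only [List.foldl_cons]
      have hslice : PySem.List.slice full (some (s : Int)) (some ((s : Int) + cur.length))
          = cur := by
        rw [PySem.List.slice_natCast_add, hdrop, List.take_left]
      rw [hslice]
      have harg : ((s : Int) + (cur.length : Int) + 1) = ((s + cur.length + 1 : Nat) : Int) := by
        push_cast; ring
      have hdrop' : full.drop (s + cur.length + 1) = ([] : List String) ++ ls := by
        have : full.drop (s + cur.length + 1) = (full.drop s).drop (cur.length + 1) := by
          rw [List.drop_drop]; ring_nf
        rw [this, hdrop]
        simp [List.drop_append]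
      have hih := ih [] (s + cur.length + 1) (segs ++ [cur]) hdrop'
      simp only [List.length_nil, Nat.cast_zero, add_zero] at hih
      rw [show (((s + cur.length + 1 : Nat)) : Int) = ((s : Int) + cur.length + 1) by
        push_cast; ring] at hih
      rw [hih, pvSplit]
      simp only [if_pos rfl, pvMergeFirst, List.append_assoc, List.singleton_append]
      cases pvSplit ls <;> simp [pvMergeFirst]
    · rw [if_neg h]
      have hdrop' : full.drop s = (cur ++ [l]) ++ ls := by
        rw [hdrop]; simp
      have harg : ((s : Int) + (cur.length : Int) + 1) = ((s : Int) + ((cur ++ [l]).length : Int)) := by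
        simp; ring
      rw [harg]
      rw [ih (cur ++ [l]) s segs hdrop']
      rw [pvSplit, if_neg h, pvMergeFirst_consFirst]

theorem B_eq_split (lines : List String) : get_config_file_segments_alt lines = pvSplit lines := by
  unfold get_config_file_segments_alt
  have h := B_fold lines lines [] 0 [] (by simp)
  simp only [List.length_nil, Nat.cast_zero, add_zero] at h
  simpa [pvDelims, pvMergeFirst_nil] using h

-- ===== VERDICT (by name: the statement is the Claim_ definition above) =====
theorem get_config_file_segments_spec : Claim_equal_get_config_file_segments := by
  intro lines _
  unfold Spec_get_config_file_segments
  rw [A_eq_split, B_eq_split]
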